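-- pv_equiv track=rewrite | github.com/kamicup/panda-tools | src/analyzers/spatial.py | sensor_shape_of
-- ===== SOURCE A (Python) =====
-- def sensor_shape_of(items: list) -> (int, int, int):
--     mx = my = mz = 0
--     for item in items:
--         if 'Sensor' in item:
--             sensor: str = item['Sensor']
--             [x, y, z] = sensor.split('_')
--             mx = max(mx, int(x))
--             my = max(my, int(y))
--             mz = max(mz, int(z))
--     return mx + 1, my + 1, mz + 1
-- ===== SOURCE B (Python) =====
-- def sensor_shape_of(items: list) -> (int, int, int):
--     # Phase 1: collect the parsed coordinate triples of all sensor items.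
--     triples = []
--     for item in items:
--         if 'Sensor' in item:
--             x, y, z = map(int, item['Sensor'].split('_'))
--             triples.append((x, y, z))
--     # Phase 2: reduce each axis separately (0 seeds the maximum, as in A).
--     mx = max([0, *(t[0] for t in triples)])
--     my = max([0, *(t[1] for t in triples)])
--     mz = max([0, *(t[2] for t in triples)])
--     return mx + 1, my + 1, mz + 1
-- ===== Notes on version B (the rewrite author's own statement) =====
-- stated objective: alternative
-- what changed: Replaces the single-pass running-maxima accumulation with a two-phase decomposition: first build the list of parsed coordinate triples, then compute each axis maximum (seeded with 0) by a separate reduction.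
import Mathlib
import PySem

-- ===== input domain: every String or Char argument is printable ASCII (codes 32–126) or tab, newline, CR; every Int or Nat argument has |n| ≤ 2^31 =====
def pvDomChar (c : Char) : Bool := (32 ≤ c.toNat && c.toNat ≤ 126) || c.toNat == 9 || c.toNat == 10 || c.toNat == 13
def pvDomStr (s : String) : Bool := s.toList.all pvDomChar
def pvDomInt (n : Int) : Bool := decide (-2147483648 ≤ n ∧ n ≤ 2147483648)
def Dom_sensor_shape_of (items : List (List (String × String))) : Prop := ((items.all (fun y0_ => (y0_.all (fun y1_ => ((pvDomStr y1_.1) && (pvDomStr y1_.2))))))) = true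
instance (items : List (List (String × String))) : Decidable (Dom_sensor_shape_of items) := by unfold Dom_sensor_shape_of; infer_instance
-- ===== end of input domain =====

-- B replaces A's single-pass running-maxima loop by a two-phase decomposition:
-- collect the parsed triples first, then reduce each axis separately (seeded with 0).


-- ===== PORT A =====
-- A: one fold carrying the running maxima (mx, my, mz).
def pvStepA (s : Int × Int × Int) (item : List (String × String)) : Int × Int × Int :=
  if item.any (fun kv => kv.1 == "Sensor") then
    let sensor := (((item.find? (fun kv => kv.1 == "Sensor")).map Prod.snd).getD "")
    match (PySem.Str.split? sensor "_").getD [] with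
    | [x, y, z] =>
      match PySem.Int.ofStr? x, PySem.Int.ofStr? y, PySem.Int.ofStr? z with
      | some xi, some yi, some zi => (max s.1 xi, max s.2.1 yi, max s.2.2 zi)
      | _, _, _ => s          -- int() ValueError: unreachable under Pre_
    | _ => s                  -- unpack ValueError: unreachable under Pre_
  else s

def sensor_shape_of (items : List (List (String × String))) : Int × Int × Int :=
  let st := items.foldl pvStepA (0, 0, 0)
  (st.1 + 1, st.2.1 + 1, st.2.2 + 1)

-- ===== PORT B =====
-- B phase 1: parse one item ('Sensor' lookup = first match in the assoc list).
def pvParseSensor (item : List (String × String)) : Option (Int × Int × Int) :=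
  match item.find? (fun kv => kv.1 == "Sensor") with
  | none => none
  | some kv =>
    match ((PySem.Str.split? kv.2 "_").getD []).map PySem.Int.ofStr? with
    | [some x, some y, some z] => some (x, y, z)
    | _ => none               -- ValueError: unreachable under Pre_

-- B phase 2: three independent axis reductions, max([0, *axis]).
def sensor_shape_of_alt (items : List (List (String × String))) : Int × Int × Int :=
  let triples := items.filterMap pvParseSensor
  (PySem.List.maxD (0 :: triples.map (fun t => t.1)) (fun v => v) 0 + 1,
   PySem.List.maxD (0 :: triples.map (fun t => t.2.1)) (fun v => v) 0 + 1,
   PySem.List.maxD (0 :: triples.map (fun t => t.2.2)) (fun v => v) 0 + 1)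

-- ===== PRECONDITION & SPEC =====
-- Pre_ excludes exactly the inputs on which A raises ValueError: an item whose
-- 'Sensor' value does not split on '_' into exactly three int()-parseable parts.
def pvSensorOK (item : List (String × String)) : Bool :=
  match item.find? (fun kv => kv.1 == "Sensor") with
  | none => true
  | some kv =>
    match ((PySem.Str.split? kv.2 "_").getD []).map PySem.Int.ofStr? with
    | [some _, some _, some _] => true
    | _ => false

def Pre_sensor_shape_of (items : List (List (String × String))) : Prop :=
  items.all pvSensorOK = true

instance (items : List (List (String × String))) : Decidable (Pre_sensor_shape_of items) := by
  unfold Pre_sensor_shape_of; infer_instance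

def pvWitness_sensor_shape_of : (List (List (String × String))) :=
  [[("Sensor", "1_2_3")], [("Mode", "x")]]

def Spec_sensor_shape_of (items : List (List (String × String))) (out : Int × Int × Int) : Prop := out = sensor_shape_of_alt items
instance (items : List (List (String × String))) (out : Int × Int × Int) : Decidable (Spec_sensor_shape_of items out) := by unfold Spec_sensor_shape_of; infer_instance

-- ===== CLAIM (what is proved, stated in full; the proofs are below) =====
def Claim_equal_sensor_shape_of : Prop := ∀ (items : List (List (String × String))), Dom_sensor_shape_of items → Pre_sensor_shape_of items → Spec_sensor_shape_of items (sensor_shape_of items)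

-- ===== LEMMAS AND PROOFS =====

theorem pvStepA_eq (item : List (String × String)) (s : Int × Int × Int)
    (h : pvSensorOK item = true) :
    pvStepA s item = match pvParseSensor item with
      | some t => (max s.1 t.1, max s.2.1 t.2.1, max s.2.2 t.2.2)
      | none => s := by
  unfold pvStepA pvParseSensor
  unfold pvSensorOK at h
  cases hf : item.find? (fun kv => kv.1 == "Sensor") with
  | none =>
    have : item.any (fun kv => kv.1 == "Sensor") = false := by
      rw [List.find?_eq_none] at hf
      simp only [List.any_eq_false]
      intro kv hkv; exact hf kv hkv
    simp [this]
  | some kv =>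
    have hany : item.any (fun kv => kv.1 == "Sensor") = true := by
      simp only [List.any_eq_true]
      exact ⟨kv, List.mem_of_find?_eq_some hf,
        List.find?_some (p := fun kv : String × String => kv.1 == "Sensor") hf⟩
    rw [hf] at h
    have h2 : (match ((PySem.Str.split? kv.2 "_").getD []).map PySem.Int.ofStr? with
        | [some _, some _, some _] => true
        | _ => false) = true := h
    clear h
    simp only [hany, if_true, Option.map_some, Option.getD_some]
    clear hf
    rcases hl : (PySem.Str.split? kv.2 "_").getD [] with _ | ⟨u, _ | ⟨v, _ | ⟨w, _ | _⟩⟩⟩ <;>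
      rw [hl] at h2 <;> simp only [List.map] at h2 ⊢ <;>
      first
      | (cases hu : PySem.Int.ofStr? u <;> cases hv : PySem.Int.ofStr? v <;>
          cases hw : PySem.Int.ofStr? w <;> rw [hu, hv, hw] at h2 <;> simp_all)
      | (revert h2; simp)

theorem pvFold_eq (items : List (List (String × String))) :
    ∀ (a b c : Int), items.all pvSensorOK = true →
    items.foldl pvStepA (a, b, c) =
      ((items.filterMap pvParseSensor).foldl (fun m t => max m t.1) a,
       (items.filterMap pvParseSensor).foldl (fun m t => max m t.2.1) b,
       (items.filterMap pvParseSensor).foldl (fun m t => max m t.2.2) c) := by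
  induction items with
  | nil => intro a b c _; simp
  | cons item rest ih =>
    intro a b c h
    simp only [List.all_cons, Bool.and_eq_true] at h
    rw [List.foldl_cons, pvStepA_eq item (a, b, c) h.1]
    cases hp : pvParseSensor item with
    | none => simp only [List.filterMap_cons, hp]; exact ih a b c h.2
    | some t =>
      simp only [List.filterMap_cons, hp, List.foldl_cons]
      exact ih _ _ _ h.2

theorem maxD_cons_zero (l : List Int) :
    PySem.List.maxD (0 :: l) (fun v => v) 0 = l.foldl max 0 := by
  simp [PySem.List.maxD, PySem.List.max?_id_cons]

theorem foldl_max_proj {α : Type} (l : List α) (f : α → Int) (a : Int) :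
    l.foldl (fun m t => max m (f t)) a = (l.map f).foldl max a := by
  induction l generalizing a with
  | nil => rfl
  | cons x xs ih => simp [List.foldl_cons, ih]

-- ===== VERDICT (by name: the statement is the Claim_ definition above) =====
theorem sensor_shape_of_spec : Claim_equal_sensor_shape_of := by
  intro items _ hpre
  unfold Spec_sensor_shape_of sensor_shape_of sensor_shape_of_alt
  rw [pvFold_eq items 0 0 0 hpre]
  simp only [maxD_cons_zero, foldl_max_proj]
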